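-- pv_equiv track=rewrite | github.com/fxbin/shuyuan-ai | apps/api/shuyuan_core/extractors.py | _parse_mentioned_tools
-- ===== SOURCE A (Python) =====
-- KNOWN_TOOLS = ["deploy", "code_exec", "external_api", "db_read", "db_write", "search", "rg", "curl"]
--
-- def _parse_mentioned_tools(text: str, commit_targets: list[str]) -> list[str]:
--     lowered = text.lower()
--     mentioned = [tool for tool in KNOWN_TOOLS if tool in lowered]
--     for target in commit_targets:
--         target_lower = target.lower()
--         for tool in KNOWN_TOOLS:
--             if tool in target_lower and tool not in mentioned:
--                 mentioned.append(tool)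
--     return mentioned
-- ===== SOURCE B (Python) =====
-- KNOWN_TOOLS = ["deploy", "code_exec", "external_api", "db_read", "db_write", "search", "rg", "curl"]
--
-- def _first_mention(tool, sources):
--     for idx, src in enumerate(sources):
--         if tool in src:
--             return idx
--     return None
--
-- def _parse_mentioned_tools(text: str, commit_targets: list[str]) -> list[str]:
--     # Rank-and-sort: give each mentioned tool the priority
--     # (first source mentioning it) * len(KNOWN_TOOLS) + (its position in KNOWN_TOOLS),
--     # then sort by that priority.  No dedup accumulator, no membership tests.
--     sources = [text.lower()] + [t.lower() for t in commit_targets]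
--     width = len(KNOWN_TOOLS)
--     ranked = []
--     for pos, tool in enumerate(KNOWN_TOOLS):
--         idx = _first_mention(tool, sources)
--         if idx is not None:
--             ranked.append((idx * width + pos, tool))
--     ranked.sort(key=lambda p: p[0])
--     return [tool for _, tool in ranked]
-- ===== Notes on version B (the rewrite author's own statement) =====
-- stated objective: alternative
-- what changed: A scans each source in order keeping a dedup accumulator with membership tests; B instead computes, per tool, the index of the first source mentioning it, assigns each mentioned tool a single numeric priority (first-source index combined with KNOWN_TOOLS position) and sorts by that priority - a rank-and-sort algorithm with no dedup list.
import Mathlib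
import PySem

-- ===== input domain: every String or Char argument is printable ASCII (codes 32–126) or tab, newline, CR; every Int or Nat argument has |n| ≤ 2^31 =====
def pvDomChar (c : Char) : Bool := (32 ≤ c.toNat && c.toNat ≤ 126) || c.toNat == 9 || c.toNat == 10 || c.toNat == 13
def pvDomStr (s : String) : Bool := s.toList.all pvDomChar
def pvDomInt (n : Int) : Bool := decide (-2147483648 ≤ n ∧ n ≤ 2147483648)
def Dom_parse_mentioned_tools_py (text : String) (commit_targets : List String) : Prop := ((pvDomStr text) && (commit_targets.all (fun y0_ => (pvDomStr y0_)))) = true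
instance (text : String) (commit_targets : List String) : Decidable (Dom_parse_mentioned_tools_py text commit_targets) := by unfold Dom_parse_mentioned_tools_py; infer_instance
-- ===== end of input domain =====

-- B replaces A's per-source dedup-append scans (a membership-tested accumulator) with a
-- rank-and-sort algorithm: each tool gets the index of the first source mentioning it,
-- combined with its KNOWN_TOOLS position into one numeric priority, and the mentioned
-- tools are sorted by that priority; objective: alternative.

def pvKnownTools : List String :=
  ["deploy", "code_exec", "external_api", "db_read", "db_write", "search", "rg", "curl"]

-- ===== PORT A =====
-- the inner-loop body 'if tool in target_lower and tool not in mentioned: mentioned.append(tool)'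
def pvToolStep (source : String) (mentioned : List String) (tool : String) : List String :=
  if PySem.Str.isIn tool source && !(mentioned.contains tool) then mentioned ++ [tool] else mentioned

def parse_mentioned_tools_py (text : String) (commit_targets : List String) : List String :=
  let lowered := PySem.Str.lower text
  let mentioned := pvKnownTools.filter (fun tool => PySem.Str.isIn tool lowered)
  commit_targets.foldl (fun mentioned target =>
    let target_lower := PySem.Str.lower target
    pvKnownTools.foldl (pvToolStep target_lower) mentioned) mentioned

-- ===== PORT B =====
-- helper _first_mention: 'for idx, src in enumerate(sources): if tool in src: return idx' / 'return None'
def pvFirstMention (tool : String) : List (Int × String) → Option Int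
  | [] => none
  | p :: rest => if PySem.Str.isIn tool p.2 then some p.1 else pvFirstMention tool rest

def parse_mentioned_tools_py_alt (text : String) (commit_targets : List String) : List String :=
  let sources := PySem.Str.lower text :: commit_targets.map (fun t => PySem.Str.lower t)
  let width : Int := (pvKnownTools.length : Int)
  let ranked := (PySem.List.enumerate pvKnownTools).foldl (fun acc pt =>
      match pvFirstMention pt.2 (PySem.List.enumerate sources) with
      | some idx => acc ++ [(idx * width + pt.1, pt.2)]
      | none => acc) []
  (PySem.List.sorted ranked (fun p => p.1)).map (fun p => p.2)

-- ===== PRECONDITION & SPEC =====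
def Spec_parse_mentioned_tools_py (text : String) (commit_targets : List String) (out : List String) : Prop := out = parse_mentioned_tools_py_alt text commit_targets
instance (text : String) (commit_targets : List String) (out : List String) : Decidable (Spec_parse_mentioned_tools_py text commit_targets out) := by unfold Spec_parse_mentioned_tools_py; infer_instance

-- ===== CLAIM (what is proved, stated in full; the proofs are below) =====
def Claim_equal_parse_mentioned_tools_py : Prop := ∀ (text : String) (commit_targets : List String), Dom_parse_mentioned_tools_py text commit_targets → Spec_parse_mentioned_tools_py text commit_targets (parse_mentioned_tools_py text commit_targets)

-- ===== LEMMAS AND PROOFS =====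

-- index of the first source containing t (proof-side abbreviation)
def pvFir (t : String) (ss : List String) : Option Nat :=
  List.findIdx? (fun s => PySem.Str.isIn t s) ss

-- the canonical form both programs compute: tools grouped by first mentioning source,
-- within a group in KNOWN_TOOLS order
def pvCanon (ss : List String) : List String :=
  (List.range ss.length).flatMap (fun j =>
    pvKnownTools.filter (fun t => pvFir t ss == some j))

theorem pv_inner (src : String) (ts : List String) (hnd : ts.Nodup) :
    ∀ acc, ts.foldl (pvToolStep src) acc
      = acc ++ ts.filter (fun t => PySem.Str.isIn t src && !acc.contains t) := by
  induction ts with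
  | nil => intro acc; simp
  | cons t rest ih =>
    intro acc
    have hnd' : rest.Nodup := hnd.of_cons
    have htr : t ∉ rest := (List.nodup_cons.mp hnd).1
    rw [List.foldl_cons, List.filter_cons]
    by_cases hin : (PySem.Str.isIn t src && !acc.contains t) = true
    · have hstep : pvToolStep src acc t = acc ++ [t] := by
        simp only [pvToolStep, hin]; simp
      rw [hstep, ih hnd' (acc ++ [t]), hin]
      have : rest.filter (fun u => PySem.Str.isIn u src && !(acc ++ [t]).contains u)
           = rest.filter (fun u => PySem.Str.isIn u src && !acc.contains u) := by
        apply List.filter_congr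
        intro u hu
        have hut : u ≠ t := fun h => htr (h ▸ hu)
        simp [hut]
      rw [this]; simp
    · have hstep : pvToolStep src acc t = acc := by
        simp only [pvToolStep, hin]; simp
      have hin' : (PySem.Str.isIn t src && !acc.contains t) = false := by
        simpa using hin
      rw [hstep, ih hnd' acc, hin']
      simp

theorem pv_contains_filter {l : List String} (p : String → Bool) {t : String} (h : t ∈ l) :
    (l.filter p).contains t = p t := by
  cases hp : p t
  · simp [List.mem_filter, hp]
  · simp [List.mem_filter, hp, h]

theorem pv_outer (ss : List String) :
    ∀ acc, ss.foldl (fun m s => pvKnownTools.foldl (pvToolStep s) m) acc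
      = acc ++ (List.range ss.length).flatMap (fun j =>
          pvKnownTools.filter (fun t => !acc.contains t && (pvFir t ss == some j))) := by
  induction ss with
  | nil => intro acc; simp
  | cons s rest ih =>
    intro acc
    rw [List.foldl_cons, pv_inner s pvKnownTools (by decide) acc, ih]
    rw [List.length_cons, List.range_succ_eq_map, List.flatMap_cons, List.flatMap_map]
    have hgrp0 : pvKnownTools.filter (fun t => !acc.contains t && (pvFir t (s :: rest) == some 0))
        = pvKnownTools.filter (fun t => PySem.Str.isIn t s && !acc.contains t) := by
      apply List.filter_congr
      intro t _
      simp only [pvFir, List.findIdx?_cons]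
      cases hin : PySem.Str.isIn t s
      · cases List.findIdx? (fun s => PySem.Str.isIn t s) rest <;> simp
      · simp [Bool.and_comm]
    have hrest : (List.range rest.length).flatMap (fun j =>
          pvKnownTools.filter (fun t =>
            !(acc ++ pvKnownTools.filter (fun u => PySem.Str.isIn u s && !acc.contains u)).contains t
              && (pvFir t rest == some j)))
        = (List.range rest.length).flatMap (fun j =>
          pvKnownTools.filter (fun t => !acc.contains t && (pvFir t (s :: rest) == some (Nat.succ j)))) := by
      apply List.flatMap_congr
      intro j _
      apply List.filter_congr
      intro t ht
      have hcf := pv_contains_filter (fun u => PySem.Str.isIn u s && !acc.contains u) ht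
      simp only [pvFir, List.findIdx?_cons, List.contains_append, hcf]
      cases hin : PySem.Str.isIn t s
      · cases List.findIdx? (fun s => PySem.Str.isIn t s) rest <;> simp [Nat.succ_eq_add_one]
      · simp
    rw [hrest, hgrp0]
    simp [List.append_assoc]

theorem pv_A_canon (text : String) (cts : List String) :
    parse_mentioned_tools_py text cts
      = pvCanon (PySem.Str.lower text :: cts.map (fun t => PySem.Str.lower t)) := by
  have h0 : pvKnownTools.filter (fun tool => PySem.Str.isIn tool (PySem.Str.lower text))
      = pvKnownTools.foldl (pvToolStep (PySem.Str.lower text)) [] := by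
    rw [pv_inner _ _ (by decide) []]
    simp
  have h1 : parse_mentioned_tools_py text cts
      = (PySem.Str.lower text :: cts.map (fun t => PySem.Str.lower t)).foldl
          (fun m s => pvKnownTools.foldl (pvToolStep s) m) [] := by
    rw [List.foldl_cons, ← h0]
    simp only [parse_mentioned_tools_py, List.foldl_map]
  rw [h1, pv_outer]
  simp only [pvCanon, List.contains_nil, Bool.not_false, Bool.true_and, List.nil_append]

theorem pv_fm (t : String) (ss : List String) :
    ∀ a : Int, pvFirstMention t (PySem.List.enumerate ss a)
      = (pvFir t ss).map (fun k => a + (k : Int)) := by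
  induction ss with
  | nil => intro a; simp [pvFirstMention, pvFir]
  | cons s rest ih =>
    intro a
    rw [PySem.List.enumerate_cons]
    simp only [pvFirstMention, pvFir, List.findIdx?_cons]
    cases hin : PySem.Str.isIn t s
    · simp only [Bool.false_eq_true, if_false]
      rw [ih (a + 1)]
      unfold pvFir
      cases List.findIdx? (fun s => PySem.Str.isIn t s) rest with
      | none => simp
      | some k =>
        simp
        omega
    · simp

theorem pv_fir_lt {t : String} {ss : List String} {k : Nat} (h : pvFir t ss = some k) :
    k < ss.length :=
  (List.findIdx?_eq_some_iff_findIdx_eq.mp h).1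

theorem pv_filterMap_eq_flatMap {α β : Type} (f : α → Option β) (l : List α) :
    l.filterMap f = l.flatMap (fun a => (f a).toList) := by
  induction l with
  | nil => simp
  | cons x xs ih => cases hx : f x <;> simp [hx, ih]

theorem pv_range_flatMap_single {α : Type} (n k : Nat) (hk : k < n) (f : Nat → List α)
    (hf : ∀ j, j ≠ k → f j = []) : (List.range n).flatMap f = f k := by
  induction n with
  | zero => omega
  | succ n ih =>
    rw [List.range_succ, List.flatMap_append]
    by_cases hkn : k = n
    · subst hkn
      have : (List.range k).flatMap f = [] := by
        rw [List.flatMap_eq_nil_iff]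
        intro j hj
        exact hf j (by simp at hj; omega)
      simp [this]
    · have hn : f n = [] := hf n (fun h => hkn h.symm)
      rw [ih (by omega)]
      simp [hn]

theorem pv_enum_filterMap_map_snd (p : String → Bool) (f : Int → Int) :
    ∀ (xs : List String) (a : Int),
      ((PySem.List.enumerate xs a).filterMap
          (fun pt => if p pt.2 then some (f pt.1, pt.2) else none)).map (fun q => q.2)
        = xs.filter p := by
  intro xs
  induction xs with
  | nil => intro a; simp [PySem.List.enumerate]
  | cons x xs ih =>
    intro a
    rw [PySem.List.enumerate_cons, List.filterMap_cons, List.filter_cons]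
    cases hx : p x <;> simp [ih (a + 1)]

-- the key sorting step: the sorted ranked list is the canonical grouping by first source
theorem pv_ranked_sorted (ss : List String) :
    PySem.List.sorted ((PySem.List.enumerate pvKnownTools).flatMap (fun pt =>
        match pvFir pt.2 ss with
        | some k => [((k : Int) * (pvKnownTools.length : Int) + pt.1, pt.2)]
        | none => [])) (fun p => p.1)
    = (List.range ss.length).flatMap (fun j =>
        (PySem.List.enumerate pvKnownTools).filterMap (fun pt =>
          if pvFir pt.2 ss == some j then
            some ((j : Int) * (pvKnownTools.length : Int) + pt.1, pt.2)
          else none)) := by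
  apply PySem.List.sorted_eq_of_perm_of_pairwise_lt
  · -- the grouped list is a permutation of the ranked list
    rw [← Multiset.coe_eq_coe]
    rw [← Multiset.coe_bind, ← Multiset.coe_bind]
    have h3 : ∀ j : Nat, ((↑((PySem.List.enumerate pvKnownTools).filterMap (fun pt =>
          if pvFir pt.2 ss == some j then
            some ((j : Int) * (pvKnownTools.length : Int) + pt.1, pt.2)
          else none))) : Multiset (Int × String))
        = (↑(PySem.List.enumerate pvKnownTools) : Multiset (Int × String)).bind (fun pt =>
            ↑((if pvFir pt.2 ss == some j then
                some ((j : Int) * (pvKnownTools.length : Int) + pt.1, pt.2)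
              else none).toList)) := by
      intro j
      rw [pv_filterMap_eq_flatMap, ← Multiset.coe_bind]
    simp only [h3]
    rw [Multiset.bind_bind]
    apply Multiset.bind_congr
    intro pt _
    rw [Multiset.coe_bind, Multiset.coe_eq_coe]
    apply List.Perm.of_eq
    cases hfr : pvFir pt.2 ss with
    | none =>
      rw [List.flatMap_eq_nil_iff.mpr]
      intro j _
      simp
    | some k =>
      have hk : k < ss.length := pv_fir_lt hfr
      rw [pv_range_flatMap_single ss.length k hk]
      · simp
      · intro j hj
        have hne : ¬ k = j := fun h => hj h.symm
        simp [hne]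
  · -- the grouped list is strictly increasing on the priority key
    rw [List.pairwise_flatMap]
    constructor
    · intro j _
      rw [List.pairwise_filterMap]
      apply List.Pairwise.imp ?_ (PySem.List.pairwise_lt_enumerate pvKnownTools 0)
      intro pt pt' hlt b hb b' hb'
      by_cases h1 : (pvFir pt.2 ss == some j) = true <;>
        by_cases h2 : (pvFir pt'.2 ss == some j) = true <;>
          simp [h1, h2] at hb hb'
      rw [← hb, ← hb']
      simpa using hlt
    · apply List.Pairwise.imp ?_ (List.pairwise_lt_range (n := ss.length))
      intro j1 j2 hj x hx y hy
      rw [List.mem_filterMap] at hx hy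
      obtain ⟨pt, hpt, hpx⟩ := hx
      obtain ⟨pt', hpt', hpy⟩ := hy
      rw [PySem.List.mem_enumerate_iff] at hpt hpt'
      obtain ⟨k1, hk1, rfl⟩ := hpt
      obtain ⟨k2, hk2, rfl⟩ := hpt'
      by_cases h1 : (pvFir pvKnownTools[k1] ss == some j1) = true <;> simp [h1] at hpx
      by_cases h2 : (pvFir pvKnownTools[k2] ss == some j2) = true <;> simp [h2] at hpy
      rw [← hpx, ← hpy]
      have hL : pvKnownTools.length = 8 := by decide
      simp only [hL] at hk1 hk2 ⊢
      push_cast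
      omega

theorem pv_B_canon (text : String) (cts : List String) :
    parse_mentioned_tools_py_alt text cts
      = pvCanon (PySem.Str.lower text :: cts.map (fun t => PySem.Str.lower t)) := by
  set ss := PySem.Str.lower text :: cts.map (fun t => PySem.Str.lower t) with hss
  show (PySem.List.sorted ((PySem.List.enumerate pvKnownTools).foldl (fun acc pt =>
      match pvFirstMention pt.2 (PySem.List.enumerate ss) with
      | some idx => acc ++ [(idx * (pvKnownTools.length : Int) + pt.1, pt.2)]
      | none => acc) []) (fun p => p.1)).map (fun p => p.2) = pvCanon ss
  have hfold : (PySem.List.enumerate pvKnownTools).foldl (fun acc pt =>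
      match pvFirstMention pt.2 (PySem.List.enumerate ss) with
      | some idx => acc ++ [(idx * (pvKnownTools.length : Int) + pt.1, pt.2)]
      | none => acc) []
      = (PySem.List.enumerate pvKnownTools).flatMap (fun pt =>
          match pvFir pt.2 ss with
          | some k => [((k : Int) * (pvKnownTools.length : Int) + pt.1, pt.2)]
          | none => []) := by
    have hfun : (fun (acc : List (Int × String)) (pt : Int × String) =>
        match pvFirstMention pt.2 (PySem.List.enumerate ss) with
        | some idx => acc ++ [(idx * (pvKnownTools.length : Int) + pt.1, pt.2)]
        | none => acc)
        = (fun acc pt => acc ++ (match pvFir pt.2 ss with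
            | some k => [((k : Int) * (pvKnownTools.length : Int) + pt.1, pt.2)]
            | none => [])) := by
      funext acc pt
      rw [pv_fm]
      cases pvFir pt.2 ss with
      | none => simp
      | some k => simp
    rw [hfun, PySem.List.foldl_append_eq_flatMap]
    simp
  rw [hfold, pv_ranked_sorted, List.map_flatMap]
  unfold pvCanon
  apply List.flatMap_congr
  intro j _
  exact pv_enum_filterMap_map_snd (fun t => pvFir t ss == some j)
    (fun i => (j : Int) * (pvKnownTools.length : Int) + i) pvKnownTools 0

-- ===== VERDICT (by name: the statement is the Claim_ definition above) =====
theorem parse_mentioned_tools_py_spec : Claim_equal_parse_mentioned_tools_py := by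
  intro text commit_targets _
  show parse_mentioned_tools_py text commit_targets = parse_mentioned_tools_py_alt text commit_targets
  rw [pv_A_canon, pv_B_canon]
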